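-- pv_equiv track=rewrite | github.com/andykr1k/NTILC | test.py | build_registry_lines
-- ===== SOURCE A (Python) =====
-- from typing import Any, Dict, Iterable, List, Mapping, Optional
--
-- def collapse_raw_tool_records(raw_rows: Iterable[Mapping[str, Any]]) -> List[Dict[str, str]]:
--     collapsed: Dict[str, Dict[str, str]] = {}
--     for row in raw_rows:
--         if not isinstance(row, Mapping):
--             continue
--         name = str(row.get("name", "")).strip()
--         if not name:
--             continue
--
--         current = collapsed.get(
--             name,
--             {
--                 "name": name,
--                 "one_line": "",
--                 "invocation": "",
--             },
--         )
--         one_line = str(row.get("one_line", "") or "").strip()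
--         invocation = str(row.get("invocation", "") or "").strip()
--
--         if len(one_line) > len(current["one_line"]):
--             current["one_line"] = one_line
--         if len(invocation) > len(current["invocation"]):
--             current["invocation"] = invocation
--
--         collapsed[name] = current
--
--     return [collapsed[name] for name in sorted(collapsed.keys())]
--
-- def build_registry_lines(raw_rows: Iterable[Mapping[str, Any]]) -> List[str]:
--     lines: List[str] = []
--     for row in collapse_raw_tool_records(raw_rows):
--         name = str(row.get("name", "")).strip()
--         one_line = " ".join(str(row.get("one_line", "")).split())
--         invocation = " ".join(str(row.get("invocation", "")).split())
--         if not name: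
--             continue
--
--         line = f"- {name}"
--         if one_line:
--             line += f": {one_line}"
--         if invocation:
--             line += f" | usage: {invocation}"
--         lines.append(line)
--     return lines
-- ===== SOURCE B (Python) =====
-- from typing import Any, Iterable, List, Mapping
--
-- def build_registry_lines(raw_rows: Iterable[Mapping[str, Any]]) -> List[str]:
--     # Collect-then-reduce: one pass groups each name's stripped candidate strings,
--     # then each group is reduced with max(key=len) (first maximum, like A's strict-greater rule).
--     groups = {}
--     for row in raw_rows:
--         if not isinstance(row, Mapping):
--             continue
--         name = str(row.get("name", "")).strip()
--         if not name:
--             continue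
--         ones, invs = groups.setdefault(name, ([], []))
--         ones.append(str(row.get("one_line", "") or "").strip())
--         invs.append(str(row.get("invocation", "") or "").strip())
--     lines: List[str] = []
--     for name in sorted(groups):
--         ones, invs = groups[name]
--         one_line = " ".join(max(ones, key=len, default="").split())
--         invocation = " ".join(max(invs, key=len, default="").split())
--         line = f"- {name}"
--         if one_line:
--             line += f": {one_line}"
--         if invocation:
--             line += f" | usage: {invocation}"
--         lines.append(line)
--     return lines
-- ===== Notes on version B (the rewrite author's own statement) =====
-- stated objective: alternative
-- what changed: Fuses A's two passes into one function and replaces the per-name running strict-max update with collect-then-reduce: one pass groups each name's stripped candidate strings into lists, and each sorted group is reduced afterwards with max(key=len) (first maximum, matching A's strict-greater tie rule), formatting directly without A's re-strip of the already-stripped name.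
import Mathlib
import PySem

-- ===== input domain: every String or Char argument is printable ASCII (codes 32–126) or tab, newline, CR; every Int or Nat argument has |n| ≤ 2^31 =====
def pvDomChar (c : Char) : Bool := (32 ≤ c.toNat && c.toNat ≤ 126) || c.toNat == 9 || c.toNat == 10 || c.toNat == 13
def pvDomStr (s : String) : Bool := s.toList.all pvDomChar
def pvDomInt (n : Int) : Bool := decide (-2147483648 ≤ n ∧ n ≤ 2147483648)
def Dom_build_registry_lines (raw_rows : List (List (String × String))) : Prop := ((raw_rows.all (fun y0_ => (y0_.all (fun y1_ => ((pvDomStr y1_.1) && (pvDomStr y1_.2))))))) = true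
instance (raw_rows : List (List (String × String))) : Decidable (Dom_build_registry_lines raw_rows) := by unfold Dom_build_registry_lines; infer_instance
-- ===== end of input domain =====

-- B fuses A's two passes and replaces the per-name running strict-max with collect-then-reduce
-- (group the stripped candidates per name, then max(key=len) per sorted group); same cost, no speed claim.

-- ===== PORT A =====
-- one iteration of A's collapse loop (rows are dicts: lookup is first match on the association list)
def pvCollapseStep (collapsed : PySem.Dict String (String × String × String)) (row : List (String × String)) :
    PySem.Dict String (String × String × String) :=
  let rowd : PySem.Dict String String := PySem.Dict.mk row
  let name := PySem.Str.strip (rowd.getD "name" "")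
  if name == "" then collapsed
  else
    let current := collapsed.getD name (name, "", "")
    -- `str(… or "").strip()`: on str values `x or ""` is the identity, so it is `.strip()` of the lookup
    let one_line := PySem.Str.strip (rowd.getD "one_line" "")
    let invocation := PySem.Str.strip (rowd.getD "invocation" "")
    let current := if PySem.Str.len current.2.1 < PySem.Str.len one_line then (current.1, one_line, current.2.2) else current
    let current := if PySem.Str.len current.2.2 < PySem.Str.len invocation then (current.1, current.2.1, invocation) else current
    collapsed.insert name current

-- collapse_raw_tool_records; the inner {"name","one_line","invocation"} dict is transcribed as a triple.
-- `collapsed[name]` cannot raise (name ranges over the keys), so it is getD with an arbitrary default.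
def collapse_raw_tool_records (raw_rows : List (List (String × String))) : List (String × String × String) :=
  let collapsed := raw_rows.foldl pvCollapseStep PySem.Dict.empty
  (PySem.List.sorted collapsed.keys (fun x => x) false).map (fun name => collapsed.getD name (name, "", ""))

def build_registry_lines (raw_rows : List (List (String × String))) : List String :=
  (collapse_raw_tool_records raw_rows).foldl (fun lines row =>
    let name := PySem.Str.strip row.1
    let one_line := PySem.Str.join " " (PySem.Str.split₀ row.2.1)
    let invocation := PySem.Str.join " " (PySem.Str.split₀ row.2.2)
    if name == "" then lines
    else
      let line := "- " ++ name
      let line := if one_line == "" then line else line ++ ": " ++ one_line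
      let line := if invocation == "" then line else line ++ " | usage: " ++ invocation
      lines ++ [line]) []

-- ===== PORT B =====
-- one iteration of B's grouping loop: append this row's stripped candidates to its name's lists
def pvGroupStep (groups : PySem.Dict String (List String × List String)) (row : List (String × String)) :
    PySem.Dict String (List String × List String) :=
  let rowd : PySem.Dict String String := PySem.Dict.mk row
  let name := PySem.Str.strip (rowd.getD "name" "")
  if name == "" then groups
  else
    let g := groups.getD name ([], [])
    groups.insert name (g.1 ++ [PySem.Str.strip (rowd.getD "one_line" "")],
                        g.2 ++ [PySem.Str.strip (rowd.getD "invocation" "")])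

def build_registry_lines_alt (raw_rows : List (List (String × String))) : List String :=
  let groups := raw_rows.foldl pvGroupStep PySem.Dict.empty
  (PySem.List.sorted groups.keys (fun x => x) false).map (fun name =>
    let g := groups.getD name ([], [])
    let one_line := PySem.Str.join " " (PySem.Str.split₀ (PySem.List.maxD g.1 PySem.Str.len ""))
    let invocation := PySem.Str.join " " (PySem.Str.split₀ (PySem.List.maxD g.2 PySem.Str.len ""))
    let line := "- " ++ name
    let line := if one_line == "" then line else line ++ ": " ++ one_line
    if invocation == "" then line else line ++ " | usage: " ++ invocation)

-- ===== PRECONDITION & SPEC =====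
def Spec_build_registry_lines (raw_rows : List (List (String × String))) (out : List String) : Prop := out = build_registry_lines_alt raw_rows
instance (raw_rows : List (List (String × String))) (out : List String) : Decidable (Spec_build_registry_lines raw_rows out) := by unfold Spec_build_registry_lines; infer_instance

-- ===== CLAIM (what is proved, stated in full; the proofs are below) =====
def Claim_equal_build_registry_lines : Prop := ∀ (raw_rows : List (List (String × String))), Dom_build_registry_lines raw_rows → Spec_build_registry_lines raw_rows (build_registry_lines raw_rows)

-- ===== LEMMAS AND PROOFS =====

-- A's running strict-max over the candidates seen so far, as a fold (what A's per-name value is)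
def pvRed (xs : List String) : String :=
  xs.foldl (fun a x => if PySem.Str.len a < PySem.Str.len x then x else a) ""

theorem pv_len_zero {x : String} (h : PySem.Str.len x = 0) : x = "" := by
  simp [PySem.Str.len] at h; exact h

theorem pvRed_append (xs : List String) (o : String) :
    pvRed (xs ++ [o]) = if PySem.Str.len (pvRed xs) < PySem.Str.len o then o else pvRed xs := by
  simp [pvRed]

theorem pv_max?_cons (a : String) (xs : List String) :
    PySem.List.max? (a :: xs) PySem.Str.len =
      some (xs.foldl (fun m x => if PySem.Str.len m < PySem.Str.len x then x else m) a) := by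
  induction xs generalizing a with
  | nil => rfl
  | cons x xs ih =>
    have h2 : PySem.List.max? (a :: x :: xs) PySem.Str.len =
        PySem.List.max? ((if PySem.Str.len a < PySem.Str.len x then x else a) :: xs) PySem.Str.len := by
      simp only [PySem.List.max?, List.foldl_cons]
      split <;> rfl
    rw [h2, ih]
    simp only [List.foldl_cons]

theorem pv_maxD_eq_red (xs : List String) :
    PySem.List.maxD xs PySem.Str.len "" = pvRed xs := by
  cases xs with
  | nil => rfl
  | cons x xs =>
    have hx : (if PySem.Str.len "" < PySem.Str.len x then x else "") = x := by
      by_cases h : PySem.Str.len "" < PySem.Str.len x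
      · rw [if_pos h]
      · have hz : PySem.Str.len x = 0 := by
          simp [PySem.Str.len] at h ⊢; omega
        rw [if_neg h, pv_len_zero hz]
    simp only [PySem.List.maxD, pv_max?_cons, Option.getD_some]
    simp only [pvRed, List.foldl_cons, hx]

theorem pv_chars_strip_idem (cs : List Char) :
    PySem.Chars.strip (PySem.Chars.strip cs) = PySem.Chars.strip cs := by
  simp only [PySem.Chars.strip, PySem.Chars.lstrip, PySem.Chars.rstrip]
  set p := PySem.Chars.isspace
  set t := List.dropWhile p cs with ht
  set u := (List.dropWhile p t.reverse).reverse with hu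
  have hpre : u <+: t := by
    have h := (List.dropWhile_suffix (l := t.reverse) p).reverse
    simpa [← hu] using h
  have h1 : List.dropWhile p u = u := by
    cases hc : u with
    | nil => simp
    | cons a l =>
      obtain ⟨r, hr⟩ := hpre
      have hta : List.dropWhile p cs = a :: (l ++ r) := by rw [← ht, ← hr, hc]; simp
      have hpa : p a = false := by
        have h2 := List.head?_dropWhile_not p cs
        rw [hta] at h2
        simpa using h2
      simp [hpa]
  rw [h1, hu]
  simp [List.dropWhile_idempotent]

theorem pv_strip_idem (s : String) : PySem.Str.strip (PySem.Str.strip s) = PySem.Str.strip s := by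
  simp [PySem.Str.strip, pv_chars_strip_idem]

-- the joint invariant of the two loops: same keys, keys are nonempty stripped strings, and per key
-- A holds (key, running strict-max of B's one_line list, running strict-max of B's invocation list)
def pvInv (c : PySem.Dict String (String × String × String))
    (g : PySem.Dict String (List String × List String)) : Prop :=
  c.keys = g.keys ∧ g.keys.Nodup ∧
  (∀ k ∈ g.keys, PySem.Str.strip k = k ∧ ¬ k = "") ∧
  (∀ k ∈ g.keys, c.get? k = some (k, pvRed (g.getD k ([], [])).1, pvRed (g.getD k ([], [])).2))

theorem pv_step (row : List (String × String))
    (c : PySem.Dict String (String × String × String))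
    (g : PySem.Dict String (List String × List String))
    (h : pvInv c g) : pvInv (pvCollapseStep c row) (pvGroupStep g row) := by
  obtain ⟨hkeys, hnd, hstr, hval⟩ := h
  set name := PySem.Str.strip ((PySem.Dict.mk row).getD "name" "") with hname
  set o := PySem.Str.strip ((PySem.Dict.mk row).getD "one_line" "") with ho
  set i := PySem.Str.strip ((PySem.Dict.mk row).getD "invocation" "") with hi
  by_cases hn : name = ""
  · have hA : pvCollapseStep c row = c := by
      simp only [pvCollapseStep, ← hname, hn]
      simp
    have hB : pvGroupStep g row = g := by
      simp only [pvGroupStep, ← hname, hn]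
      simp
    rw [hA, hB]
    exact ⟨hkeys, hnd, hstr, hval⟩
  · have hnb : (name == "") = false := by simpa using hn
    set gv := g.getD name ([], []) with hgv
    have hcont : c.contains name = g.contains name := by
      rw [PySem.Dict.contains_eq_decide_mem_keys, PySem.Dict.contains_eq_decide_mem_keys, hkeys]
    have hcur : c.getD name (name, "", "") = (name, pvRed gv.1, pvRed gv.2) := by
      by_cases hm : name ∈ g.keys
      · rw [PySem.Dict.getD_eq_get?_getD, hval name hm]
        rfl
      · have hc0 : c.get? name = none := by
          rw [PySem.Dict.get?_eq_none_iff_not_mem_keys, hkeys]; exact hm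
        have hg0 : g.get? name = none := by
          rw [PySem.Dict.get?_eq_none_iff_not_mem_keys]; exact hm
        rw [PySem.Dict.getD_eq_get?_getD, hc0]
        rw [hgv, PySem.Dict.getD_eq_get?_getD, hg0]
        rfl
    have hB : pvGroupStep g row = g.insert name (gv.1 ++ [o], gv.2 ++ [i]) := by
      simp only [pvGroupStep, ← hname, ← ho, ← hi, ← hgv, hnb]
      simp
    have hA : pvCollapseStep c row = c.insert name (name, pvRed (gv.1 ++ [o]), pvRed (gv.2 ++ [i])) := by
      simp only [pvCollapseStep, ← hname, ← ho, ← hi, hnb]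
      rw [hcur]
      simp only [Bool.false_eq_true, if_false]
      refine congrArg (c.insert name) ?_
      rw [pvRed_append, pvRed_append]
      by_cases h1 : PySem.Str.len (pvRed gv.1) < PySem.Str.len o
      · simp only [if_pos h1]
        by_cases h2 : PySem.Str.len (pvRed gv.2) < PySem.Str.len i
        · simp only [if_pos h2]
        · simp only [if_neg h2]
      · simp only [if_neg h1]
        by_cases h2 : PySem.Str.len (pvRed gv.2) < PySem.Str.len i
        · simp only [if_pos h2]
        · simp only [if_neg h2]
    rw [hA, hB]
    refine ⟨?_, ?_, ?_, ?_⟩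
    · by_cases hcg : g.contains name = true
      · rw [PySem.Dict.keys_insert_of_contains _ _ (hcont.trans hcg),
            PySem.Dict.keys_insert_of_contains _ _ hcg, hkeys]
      · have hcg' : g.contains name = false := by simpa using hcg
        rw [PySem.Dict.keys_insert_of_not_contains _ _ (hcont.trans hcg'),
            PySem.Dict.keys_insert_of_not_contains _ _ hcg', hkeys]
    · exact PySem.Dict.nodup_keys_insert _ _ _ hnd
    · intro k hk
      rcases (PySem.Dict.mem_keys_insert _ _ _ _).mp hk with hk | hk
      · subst hk
        exact ⟨by rw [hname, pv_strip_idem], hn⟩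
      · exact hstr k hk
    · intro k hk
      by_cases hkn : k = name
      · subst hkn
        rw [PySem.Dict.get?_insert_self, PySem.Dict.getD_eq_get?_getD, PySem.Dict.get?_insert_self]
        rfl
      · rcases (PySem.Dict.mem_keys_insert _ _ _ _).mp hk with hk' | hk'
        · exact absurd hk' hkn
        · rw [PySem.Dict.get?_insert_of_ne _ _ hkn, PySem.Dict.getD_eq_get?_getD,
              PySem.Dict.get?_insert_of_ne _ _ hkn, ← PySem.Dict.getD_eq_get?_getD]
          exact hval k hk'

theorem pv_inv_foldl (rows : List (List (String × String)))
    (c : PySem.Dict String (String × String × String))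
    (g : PySem.Dict String (List String × List String))
    (h : pvInv c g) : pvInv (rows.foldl pvCollapseStep c) (rows.foldl pvGroupStep g) := by
  induction rows generalizing c g with
  | nil => exact h
  | cons row rows ih => exact ih _ _ (pv_step row c g h)

-- A's formatting loop appends one line per row once no row has an empty stripped name
theorem pv_fmt_fold (l : List (String × String × String)) (acc : List String)
    (h : ∀ r ∈ l, ¬ PySem.Str.strip r.1 = "") :
    l.foldl (fun lines row =>
      let name := PySem.Str.strip row.1
      let one_line := PySem.Str.join " " (PySem.Str.split₀ row.2.1)
      let invocation := PySem.Str.join " " (PySem.Str.split₀ row.2.2)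
      if name == "" then lines
      else
        let line := "- " ++ name
        let line := if one_line == "" then line else line ++ ": " ++ one_line
        let line := if invocation == "" then line else line ++ " | usage: " ++ invocation
        lines ++ [line]) acc
    = acc ++ l.map (fun row =>
        let name := PySem.Str.strip row.1
        let one_line := PySem.Str.join " " (PySem.Str.split₀ row.2.1)
        let invocation := PySem.Str.join " " (PySem.Str.split₀ row.2.2)
        let line := "- " ++ name
        let line := if one_line == "" then line else line ++ ": " ++ one_line
        if invocation == "" then line else line ++ " | usage: " ++ invocation) := by
  induction l generalizing acc with
  | nil => simp
  | cons r l ih =>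
    have hr : (PySem.Str.strip r.1 == "") = false := by
      simpa using h r (by simp)
    simp only [List.foldl_cons, List.map_cons, hr, Bool.false_eq_true, if_false]
    rw [ih _ (fun x hx => h x (by simp [hx]))]
    simp

-- ===== VERDICT (by name: the statement is the Claim_ definition above) =====
theorem build_registry_lines_spec : Claim_equal_build_registry_lines := by
  intro raw_rows _hdom
  unfold Spec_build_registry_lines build_registry_lines build_registry_lines_alt collapse_raw_tool_records
  obtain ⟨hkeys, hnd, hstr, hval⟩ :=
    pv_inv_foldl raw_rows PySem.Dict.empty PySem.Dict.empty
      ⟨by simp [PySem.Dict.keys_empty], by simp [PySem.Dict.keys_empty],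
       by simp [PySem.Dict.keys_empty], by simp [PySem.Dict.keys_empty]⟩
  set cf := raw_rows.foldl pvCollapseStep PySem.Dict.empty with hcf
  set gf := raw_rows.foldl pvGroupStep PySem.Dict.empty with hgf
  rw [pv_fmt_fold]
  · rw [List.nil_append, List.map_map, hkeys]
    apply List.map_congr_left
    intro n hn
    have hmem : n ∈ gf.keys := (PySem.List.mem_sorted _ _ _ _).mp hn
    have hv := hval n hmem
    have hgetD : cf.getD n (n, "", "") =
        (n, pvRed (gf.getD n ([], [])).1, pvRed (gf.getD n ([], [])).2) := by
      rw [PySem.Dict.getD_eq_get?_getD, hv]; rfl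
    obtain ⟨hsn, hne⟩ := hstr n hmem
    simp only [Function.comp_apply, hgetD, hsn, pv_maxD_eq_red]
  · intro r hr
    rw [List.mem_map] at hr
    obtain ⟨n, hn, hrn⟩ := hr
    have hmemc : n ∈ cf.keys := (PySem.List.mem_sorted _ _ _ _).mp hn
    have hmem : n ∈ gf.keys := by rw [← hkeys]; exact hmemc
    have hv := hval n hmem
    have h1 : r.1 = n := by
      rw [← hrn, PySem.Dict.getD_eq_get?_getD, hv]
      rfl
    rw [h1]
    obtain ⟨hsn, hne⟩ := hstr n hmem
    rw [hsn]; exact hne
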